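-- pv_equiv track=rewrite | github.com/project-arktosmos/pokecrystal-cat | tools/fix_line_lengths.py | calculate_visible_length
-- ===== SOURCE A (Python) =====
-- CONTROL_CODE_LENGTHS = {
--     '#': 4,           # "POKé"
--     '<PLAYER>': 7,    # Max player name length
--     '<PLAY_G>': 7,    # Same as PLAYER in English
--     '<RIVAL>': 7,     # Max rival name length
--     '<USER>': 10,     # Pokemon name (max 10)
--     '<TARGET>': 10,   # Pokemon name (max 10)
--     '<ENEMY>': 6,     # "Enemy "
--     '<MOM>': 4,       # Mom's name
--     '<RED>': 7,       # Red's name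
--     '<GREEN>': 7,     # Green's name
-- }
--
-- INVISIBLE_CODES = [
--     '<NULL>', '<PAGE>', '<PKMN>', '<_CONT>', '<SCROLL>', '<NEXT>', '<LINE>',
--     '<PARA>', '<CONT>', '<……>', '<DONE>', '<PROMPT>', '<DEXEND>',
--     '<PC>', '<TM>', '<TRAINER>', '<ROCKET>', '<PK>', '<MN>',
--     '<BOLD_A>', '<BOLD_B>', '<BOLD_C>', '<BOLD_D>', '<BOLD_E>', '<BOLD_F>',
--     '<BOLD_G>', '<BOLD_H>', '<BOLD_I>', '<BOLD_V>', '<BOLD_S>', '<BOLD_L>',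
--     '<BOLD_M>', '<BOLD_P>', '<COLON>', '<LV>', '<to>', '<ID>', '<ED>',
--     '<DOT>',
-- ]
--
-- def calculate_visible_length(text):
--     """
--     Calculate the visible length of a text string, accounting for control codes.
--     """
--     visible_len = 0
--     i = 0
--     while i < len(text):
--         # Check for # (POKé)
--         if text[i] == '#':
--             visible_len += CONTROL_CODE_LENGTHS.get('#', 1)
--             i += 1
--             continue
--
--         # Check for control codes in angle brackets
--         if text[i] == '<':
--             end = text.find('>', i)
--             if end != -1:
--                 code = text[i:end+1]
--                 if code in CONTROL_CODE_LENGTHS: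
--                     visible_len += CONTROL_CODE_LENGTHS[code]
--                 elif code in INVISIBLE_CODES:
--                     visible_len += 0  # Invisible
--                 else:
--                     # Unknown code, assume it produces some output
--                     visible_len += 1
--                 i = end + 1
--                 continue
--
--         # Check for curly brace variables {d:...}, {text_...}, etc.
--         if text[i] == '{':
--             end = text.find('}', i)
--             if end != -1:
--                 var_content = text[i+1:end]
--                 # Variables expand to numeric or text values
--                 # Most {d:...} are 2-3 digit numbers
--                 if var_content.startswith('d:'):
--                     visible_len += 3  # Most numbers are 2-3 digits
--                 else:
--                     visible_len += 5  # Other variables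
--                 i = end + 1
--                 continue
--
--         # Check for @ (string terminator, not visible)
--         if text[i] == '@':
--             i += 1
--             continue
--
--         # Regular character
--         visible_len += 1
--         i += 1
--
--     return visible_len
-- ===== SOURCE B (Python) =====
-- CONTROL_CODE_LENGTHS = {
--     '#': 4,
--     '<PLAYER>': 7,
--     '<PLAY_G>': 7,
--     '<RIVAL>': 7,
--     '<USER>': 10,
--     '<TARGET>': 10,
--     '<ENEMY>': 6,
--     '<MOM>': 4,
--     '<RED>': 7,
--     '<GREEN>': 7,
-- }
--
-- _INVISIBLE = frozenset([
--     '<NULL>', '<PAGE>', '<PKMN>', '<_CONT>', '<SCROLL>', '<NEXT>', '<LINE>',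
--     '<PARA>', '<CONT>', '<……>', '<DONE>', '<PROMPT>', '<DEXEND>',
--     '<PC>', '<TM>', '<TRAINER>', '<ROCKET>', '<PK>', '<MN>',
--     '<BOLD_A>', '<BOLD_B>', '<BOLD_C>', '<BOLD_D>', '<BOLD_E>', '<BOLD_F>',
--     '<BOLD_G>', '<BOLD_H>', '<BOLD_I>', '<BOLD_V>', '<BOLD_S>', '<BOLD_L>',
--     '<BOLD_M>', '<BOLD_P>', '<COLON>', '<LV>', '<to>', '<ID>', '<ED>',
--     '<DOT>',
-- ])
--
--
-- def calculate_visible_length(text):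
--     n = len(text)
--     # Backward pass: position of the next '>' / '}' at or after each index (-1 if none),
--     # so the forward scan below never re-searches the tail.
--     nxt_gt = [-1] * (n + 1)
--     nxt_br = [-1] * (n + 1)
--     for j in range(n - 1, -1, -1):
--         nxt_gt[j] = j if text[j] == '>' else nxt_gt[j + 1]
--         nxt_br[j] = j if text[j] == '}' else nxt_br[j + 1]
--     vis = 0
--     i = 0
--     while i < n:
--         c = text[i]
--         if c == '#':
--             vis += 4
--             i += 1
--         elif c == '<' and nxt_gt[i] != -1:
--             end = nxt_gt[i]
--             code = text[i:end + 1]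
--             if code in CONTROL_CODE_LENGTHS:
--                 vis += CONTROL_CODE_LENGTHS[code]
--             elif code not in _INVISIBLE:
--                 vis += 1
--             i = end + 1
--         elif c == '{' and nxt_br[i] != -1:
--             end = nxt_br[i]
--             vis += 3 if text[i + 1:end].startswith('d:') else 5
--             i = end + 1
--         elif c == '@':
--             i += 1
--         else:
--             vis += 1
--             i += 1
--     return vis
-- ===== Notes on version B (the rewrite author's own statement) =====
-- stated objective: alternative
-- what changed: B precomputes in one backward pass, for every index, the position of the next closing angle bracket and of the next closing curly bracket, so the forward scan replaces A's str.find tail re-scans (quadratic when many opening brackets have no closer) by constant-time table lookups; the invisible-code list becomes a frozenset.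
import Mathlib
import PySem

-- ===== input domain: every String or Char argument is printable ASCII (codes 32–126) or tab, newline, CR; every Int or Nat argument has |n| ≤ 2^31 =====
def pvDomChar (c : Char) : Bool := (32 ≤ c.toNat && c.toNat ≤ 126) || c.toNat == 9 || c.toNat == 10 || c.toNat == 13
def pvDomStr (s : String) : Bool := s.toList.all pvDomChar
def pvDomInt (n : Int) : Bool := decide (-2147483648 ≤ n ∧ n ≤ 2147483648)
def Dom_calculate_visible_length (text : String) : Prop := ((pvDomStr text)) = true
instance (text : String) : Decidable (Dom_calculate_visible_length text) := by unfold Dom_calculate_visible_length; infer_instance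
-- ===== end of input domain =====

-- B replaces A's repeated str.find calls by one backward pass that precomputes, for every
-- index, the position of the next closing bracket; the forward scan then only does table
-- lookups. Same return value on every input.

-- ===== PORT A =====
-- module constant CONTROL_CODE_LENGTHS (dict str -> int)
def pvCCL : PySem.Dict (List Char) Int :=
  PySem.Dict.ofList [("#".toList, 4), ("<PLAYER>".toList, 7), ("<PLAY_G>".toList, 7),
    ("<RIVAL>".toList, 7), ("<USER>".toList, 10), ("<TARGET>".toList, 10),
    ("<ENEMY>".toList, 6), ("<MOM>".toList, 4), ("<RED>".toList, 7), ("<GREEN>".toList, 7)]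

-- module constant INVISIBLE_CODES (list of str)
def pvINVIS : List (List Char) :=
  ["<NULL>".toList, "<PAGE>".toList, "<PKMN>".toList, "<_CONT>".toList, "<SCROLL>".toList,
   "<NEXT>".toList, "<LINE>".toList, "<PARA>".toList, "<CONT>".toList, "<……>".toList,
   "<DONE>".toList, "<PROMPT>".toList, "<DEXEND>".toList, "<PC>".toList, "<TM>".toList,
   "<TRAINER>".toList, "<ROCKET>".toList, "<PK>".toList, "<MN>".toList,
   "<BOLD_A>".toList, "<BOLD_B>".toList, "<BOLD_C>".toList, "<BOLD_D>".toList, "<BOLD_E>".toList,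
   "<BOLD_F>".toList, "<BOLD_G>".toList, "<BOLD_H>".toList, "<BOLD_I>".toList, "<BOLD_V>".toList,
   "<BOLD_S>".toList, "<BOLD_L>".toList, "<BOLD_M>".toList, "<BOLD_P>".toList, "<COLON>".toList,
   "<LV>".toList, "<to>".toList, "<ID>".toList, "<ED>".toList, "<DOT>".toList]

-- A's while loop; fuel = remaining iterations (i advances by ≥ 1 each round, so
-- fuel = len(text) suffices).  Python's fall-through after a failed find is rendered by the
-- local continuations step4 ('@' / regular char checks) and step3 ('{' check).
def aLoop : Nat → List Char → Nat → Int → Int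
  | 0, _, _, vis => vis
  | fuel + 1, cs, i, vis =>
    if i < cs.length then
      let c := cs.getD i ' '   -- text[i], in range here
      let step4 : Int → Int := fun vis =>
        if c = '@' then aLoop fuel cs (i + 1) vis
        else aLoop fuel cs (i + 1) (vis + 1)
      let step3 : Int → Int := fun vis =>
        if c = '{' then
          let e := PySem.Chars.findFrom cs ['}'] (i : Int)   -- text.find('}', i)
          if e ≠ -1 then
            let content := PySem.List.slice cs (some ((i : Int) + 1)) (some e)  -- text[i+1:end]
            if PySem.Chars.startswith content ("d:".toList) then aLoop fuel cs (e.toNat + 1) (vis + 3)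
            else aLoop fuel cs (e.toNat + 1) (vis + 5)
          else step4 vis
        else step4 vis
      if c = '#' then aLoop fuel cs (i + 1) (vis + PySem.Dict.getD pvCCL ['#'] 1)
      else if c = '<' then
        let e := PySem.Chars.findFrom cs ['>'] (i : Int)   -- text.find('>', i)
        if e ≠ -1 then
          let code := PySem.List.slice cs (some (i : Int)) (some (e + 1))  -- text[i:end+1]
          match PySem.Dict.get? pvCCL code with
          | some v => aLoop fuel cs (e.toNat + 1) (vis + v)
          | none =>
            if code ∈ pvINVIS then aLoop fuel cs (e.toNat + 1) (vis + 0)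
            else aLoop fuel cs (e.toNat + 1) (vis + 1)
        else step3 vis
      else step3 vis
    else vis

def calculate_visible_length (text : String) : Int :=
  aLoop text.toList.length text.toList 0 0

-- ===== PORT B =====
-- Source B's frozenset(INVISIBLE_CODES)
def pvINVISset : PySem.Set (List Char) := PySem.Set.ofList pvINVIS

-- Source B's backward pass: bNexts c cs j = [nxt[j], nxt[j+1], …, nxt[n]] where nxt[k] is the
-- position (as absolute index) of the first occurrence of c at or after k, -1 if none
-- (nxt[k] = k if text[k] == c else nxt[k+1], the loop body run right-to-left).
def bNexts (c : Char) : List Char → Nat → List Int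
  | [], _ => [-1]
  | x :: rest, j =>
    let tail := bNexts c rest (j + 1)
    (if x = c then (j : Int) else tail.headD (-1)) :: tail

-- Source B's forward scan; list indexing nxt[i] is rendered with getD (always in range: i ≤ n)
def bLoop : Nat → List Char → List Int → List Int → Nat → Int → Int
  | 0, _, _, _, _, vis => vis
  | fuel + 1, cs, gts, brs, i, vis =>
    if i < cs.length then
      let c := cs.getD i ' '
      if c = '#' then bLoop fuel cs gts brs (i + 1) (vis + 4)
      else if c = '<' ∧ gts.getD i (-1) ≠ -1 then
        let e := gts.getD i (-1)
        let code := PySem.List.slice cs (some (i : Int)) (some (e + 1))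
        match PySem.Dict.get? pvCCL code with
        | some v => bLoop fuel cs gts brs (e.toNat + 1) (vis + v)
        | none =>
          if pvINVISset.contains code then bLoop fuel cs gts brs (e.toNat + 1) vis
          else bLoop fuel cs gts brs (e.toNat + 1) (vis + 1)
      else if c = '{' ∧ brs.getD i (-1) ≠ -1 then
        let e := brs.getD i (-1)
        if PySem.Chars.startswith (PySem.List.slice cs (some ((i : Int) + 1)) (some e)) ("d:".toList)
        then bLoop fuel cs gts brs (e.toNat + 1) (vis + 3)
        else bLoop fuel cs gts brs (e.toNat + 1) (vis + 5)
      else if c = '@' then bLoop fuel cs gts brs (i + 1) vis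
      else bLoop fuel cs gts brs (i + 1) (vis + 1)
    else vis

def calculate_visible_length_alt (text : String) : Int :=
  bLoop text.toList.length text.toList (bNexts '>' text.toList 0) (bNexts '}' text.toList 0) 0 0

-- ===== PRECONDITION & SPEC =====
def Spec_calculate_visible_length (text : String) (out : Int) : Prop := out = calculate_visible_length_alt text
instance (text : String) (out : Int) : Decidable (Spec_calculate_visible_length text out) := by unfold Spec_calculate_visible_length; infer_instance

-- ===== CLAIM (what is proved, stated in full; the proofs are below) =====
def Claim_equal_calculate_visible_length : Prop := ∀ (text : String), Dom_calculate_visible_length text → Spec_calculate_visible_length text (calculate_visible_length text)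

-- ===== LEMMAS AND PROOFS =====

-- a character is a member iff the singleton is an infix
lemma singleton_infix_iff_mem (c : Char) (l : List Char) : [c] <:+: l ↔ c ∈ l := by
  constructor
  · intro h
    exact h.sublist.subset (List.mem_singleton_self c)
  · intro h
    rcases List.append_of_mem h with ⟨s, t, rfl⟩
    exact ⟨s, t, by simp⟩

-- one unfolding step of Python's str.find for a single-character needle
lemma find_singleton_nil (c : Char) : PySem.Chars.find [] [c] = -1 := by
  rw [PySem.Chars.find_eq_neg_one_iff, singleton_infix_iff_mem]
  simp

lemma find_singleton_cons (x c : Char) (cs : List Char) :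
    PySem.Chars.find (x :: cs) [c] =
      if x = c then 0
      else if PySem.Chars.find cs [c] = -1 then -1 else PySem.Chars.find cs [c] + 1 := by
  by_cases hx : x = c
  · subst hx
    rw [if_pos rfl]
    have hinf : [x] <:+: x :: cs := (singleton_infix_iff_mem x _).mpr (List.mem_cons_self)
    have h0 : 0 ≤ PySem.Chars.find (x :: cs) [x] := (PySem.Chars.find_nonneg_iff _ _).mpr hinf
    obtain ⟨-, hmin⟩ := PySem.Chars.find_spec h0
    have hz : (PySem.Chars.find (x :: cs) [x]).toNat = 0 := by
      by_contra hne
      exact hmin 0 (Nat.pos_of_ne_zero hne) ⟨cs, rfl⟩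
    omega
  · rw [if_neg hx]
    by_cases hf : PySem.Chars.find cs [c] = -1
    · have hcm : c ∉ cs := by
        have h1 := (PySem.Chars.find_eq_neg_one_iff cs [c]).mp hf
        rwa [singleton_infix_iff_mem] at h1
      rw [if_pos hf, PySem.Chars.find_eq_neg_one_iff, singleton_infix_iff_mem, List.mem_cons]
      rintro (h | h)
      · exact hx h.symm
      · exact hcm h
    · rw [if_neg hf]
      have h0 : 0 ≤ PySem.Chars.find cs [c] := by
        have := PySem.Chars.neg_one_le_find cs [c]
        omega
      obtain ⟨hpre, hmin⟩ := PySem.Chars.find_spec h0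
      set r := (PySem.Chars.find cs [c]).toNat with hr
      have hinf : [c] <:+: x :: cs := by
        rw [singleton_infix_iff_mem]
        have h2 : [c] <:+: cs := (PySem.Chars.find_nonneg_iff _ _).mp h0
        exact List.mem_cons_of_mem x ((singleton_infix_iff_mem c cs).mp h2)
      have h0' : 0 ≤ PySem.Chars.find (x :: cs) [c] := (PySem.Chars.find_nonneg_iff _ _).mpr hinf
      obtain ⟨hpre', hmin'⟩ := PySem.Chars.find_spec h0'
      set f := (PySem.Chars.find (x :: cs) [c]).toNat with hfdef
      have hub : f ≤ r + 1 := by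
        by_contra hlt
        have hp2 : [c] <+: List.drop (r + 1) (x :: cs) := by
          rw [List.drop_succ_cons]
          exact hpre
        exact hmin' (r + 1) (by omega) hp2
      have hnz : f ≠ 0 := by
        intro h
        rw [h] at hpre'
        simp only [List.drop_zero] at hpre'
        rcases hpre' with ⟨t, ht⟩
        have hcx : c = x := by
          have h5 := congrArg (fun l => l.headD ' ') ht
          simpa using h5
        exact hx hcx.symm
      have hlb : r ≤ f - 1 := by
        by_contra hlt
        have hdropeq : List.drop f (x :: cs) = List.drop (f - 1) cs := by
          obtain ⟨k, hk⟩ : ∃ k, f = k + 1 := ⟨f - 1, by omega⟩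
          rw [hk]
          simp
        rw [hdropeq] at hpre'
        exact hmin (f - 1) (by omega) hpre'
      omega

-- the backward pass computes exactly str.find for the suffix, shifted by the start index
lemma bNexts_getD (c : Char) (cs : List Char) :
    ∀ i j, (bNexts c cs j).getD i (-1) =
      if PySem.Chars.find (cs.drop i) [c] = -1 then -1
      else (j : Int) + (i : Int) + PySem.Chars.find (cs.drop i) [c] := by
  induction cs with
  | nil =>
    intro i j
    simp only [bNexts, List.drop_nil, find_singleton_nil, if_pos]
    cases i <;> simp [List.getD]
  | cons x rest ih =>
    intro i j
    cases i with
    | zero =>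
      simp only [bNexts, List.getD_cons_zero, List.drop_zero, find_singleton_cons]
      by_cases hx : x = c
      · simp [hx]
      · have hh : (bNexts c rest (j + 1)).headD (-1) = (bNexts c rest (j + 1)).getD 0 (-1) := by
          cases h : bNexts c rest (j + 1) <;> simp [List.headD, List.getD]
        simp only [if_neg hx]
        rw [hh, ih 0 (j + 1)]
        simp only [List.drop_zero]
        have hge := PySem.Chars.neg_one_le_find rest [c]
        by_cases hf : PySem.Chars.find rest [c] = -1
        · simp [hf]
        · simp only [if_neg hf]
          rw [if_neg (by omega : ¬(PySem.Chars.find rest [c] + 1 = -1))]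
          push_cast
          ring
    | succ i' =>
      simp only [bNexts, List.getD_cons_succ, List.drop_succ_cons]
      rw [ih i' (j + 1)]
      by_cases hf : PySem.Chars.find (rest.drop i') [c] = -1
      · simp [hf]
      · rw [if_neg hf, if_neg hf]
        push_cast
        ring

-- text.find(ch, i) equals the precomputed next-position table at i
lemma findFrom_eq_bNexts (c : Char) (cs : List Char) (i : Nat) (hi : i ≤ cs.length) :
    PySem.Chars.findFrom cs [c] (i : Int) = (bNexts c cs 0).getD i (-1) := by
  rw [PySem.Chars.findFrom_natCast cs [c] i hi, bNexts_getD]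
  by_cases hf : PySem.Chars.find (cs.drop i) [c] = -1
  · simp [hf]
  · rw [if_neg hf, if_neg hf]
    ring

set_option maxRecDepth 4096 in
lemma pvINVISset_eq : pvINVISset = pvINVIS := by rfl

set_option maxRecDepth 4096 in
lemma pvCCL_hash : PySem.Dict.getD pvCCL ['#'] 1 = 4 := by rfl

-- the two loops agree step for step
lemma aLoop_eq_bLoop (cs : List Char) :
    ∀ fuel i vis, aLoop fuel cs i vis = bLoop fuel cs (bNexts '>' cs 0) (bNexts '}' cs 0) i vis := by
  intro fuel
  induction fuel with
  | zero => intro i vis; rfl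
  | succ fuel ih =>
    intro i vis
    simp only [aLoop, bLoop]
    by_cases hi : i < cs.length
    · simp only [if_pos hi]
      have hgt := findFrom_eq_bNexts '>' cs i (le_of_lt hi)
      have hbr := findFrom_eq_bNexts '}' cs i (le_of_lt hi)
      rw [hgt, hbr]
      set g := (bNexts '>' cs 0).getD i (-1) with hgdef
      set bb := (bNexts '}' cs 0).getD i (-1) with hbdef
      set c := cs.getD i ' ' with hc
      by_cases h1 : c = '#'
      · simp only [if_pos h1, pvCCL_hash]
        exact ih _ _
      · simp only [if_neg h1]
        by_cases h2 : c = '<'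
        · by_cases hg : g = -1
          · simp [h2, hg, ih, show ('<' : Char) ≠ '{' from by decide,
                  show ('<' : Char) ≠ '@' from by decide]
          · simp only [ne_eq, hg, not_false_iff, and_true, if_pos h2]
            cases hq : PySem.Dict.get? pvCCL (PySem.List.slice cs (some (i : Int)) (some (g + 1))) with
            | some v => simp [ih]
            | none => simp [pvINVISset_eq, ih]
        · have hA : ¬(c = '<' ∧ g ≠ -1) := fun h => h2 h.1
          simp only [if_neg h2, if_neg hA]
          by_cases h3 : c = '{'
          · by_cases hb : bb = -1
            · simp [h3, hb, ih, show ('{' : Char) ≠ '@' from by decide]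
            · have hB : c = '{' ∧ bb ≠ -1 := ⟨h3, hb⟩
              simp only [if_pos h3, if_pos hB]
              by_cases hd : PySem.Chars.startswith (PySem.List.slice cs (some ((i : Int) + 1)) (some bb)) ['d', ':'] = true
              · simp [hb, hd, ih]
              · simp [hb, hd, ih]
          · have hB : ¬(c = '{' ∧ bb ≠ -1) := fun h => h3 h.1
            simp only [if_neg h3, if_neg hB]
            by_cases h4 : c = '@'
            · simp [h4, ih]
            · simp [h4, ih]
    · simp [hi]

-- ===== VERDICT (by name: the statement is the Claim_ definition above) =====
theorem calculate_visible_length_spec : Claim_equal_calculate_visible_length := by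
  intro text _
  unfold Spec_calculate_visible_length calculate_visible_length calculate_visible_length_alt
  exact aLoop_eq_bLoop text.toList text.toList.length 0 0
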